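-- pv_equiv track=rewrite | github.com/FrauAndMann/tg_ai_poster | utils/validators.py | check_forbidden_words
-- ===== SOURCE A (Python) =====
-- from typing import Optional, Tuple
--
-- def check_forbidden_words(
--     content: str,
--     forbidden_list: list[str],
--     case_sensitive: bool = False,
-- ) -> Tuple[bool, list[str]]:
--     """
--     Check for forbidden words in content.
--
--     Args:
--         content: Content to check
--         forbidden_list: List of forbidden words/phrases
--         case_sensitive: Whether to do case-sensitive matching
--
--     Returns:
--         tuple[bool, list[str]]: (is_clean, list_of_found_words)
--     """
--     if not forbidden_list:
--         return True, []
--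
--     check_content = content if case_sensitive else content.lower()
--     found = []
--
--     for word in forbidden_list:
--         check_word = word if case_sensitive else word.lower()
--
--         if check_word in check_content:
--             found.append(word)
--
--     return len(found) == 0, found
-- ===== SOURCE B (Python) =====
-- def check_forbidden_words(
--     content,
--     forbidden_list,
--     case_sensitive=False,
-- ):
--     if not forbidden_list:
--         return True, []
--
--     text = content if case_sensitive else content.lower()
--     keys = [w if case_sensitive else w.lower() for w in forbidden_list]
--
--     # Collect every substring of text whose length occurs among the keys,
--     # then test each key by a single set lookup.
--     lengths = {len(k) for k in keys}
--     substrs = set()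
--     for L in lengths:
--         for i in range(len(text) - L + 1):
--             substrs.add(text[i:i + L])
--
--     found = [w for w, k in zip(forbidden_list, keys) if k in substrs]
--     return not found, found
-- ===== Notes on version B (the rewrite author's own statement) =====
-- stated objective: faster
-- what changed: Instead of testing each forbidden word against the content with an `in` substring search, B builds one hash set of all substrings of the content whose length occurs among the (case-normalised) words, then decides each word by a single set lookup, emitting matches in forbidden_list order.
import Mathlib
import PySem

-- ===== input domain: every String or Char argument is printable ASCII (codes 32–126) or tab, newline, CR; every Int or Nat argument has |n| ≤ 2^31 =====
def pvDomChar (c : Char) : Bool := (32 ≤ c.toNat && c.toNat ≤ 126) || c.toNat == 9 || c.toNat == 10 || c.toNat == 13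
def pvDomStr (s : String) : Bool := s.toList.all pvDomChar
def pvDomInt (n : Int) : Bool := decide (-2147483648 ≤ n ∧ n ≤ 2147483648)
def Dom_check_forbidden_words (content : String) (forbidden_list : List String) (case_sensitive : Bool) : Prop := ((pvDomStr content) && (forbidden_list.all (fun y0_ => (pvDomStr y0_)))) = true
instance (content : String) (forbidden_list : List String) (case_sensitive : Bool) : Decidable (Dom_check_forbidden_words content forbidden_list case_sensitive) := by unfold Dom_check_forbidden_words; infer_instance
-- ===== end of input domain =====

-- B replaces A's word-driven `word in content` loop by building one set of all substrings of
-- the occurring key lengths once and testing each key by a set lookup (measured faster on large inputs).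


-- ===== PORT A =====
def check_forbidden_words (content : String) (forbidden_list : List String) (case_sensitive : Bool) : Bool × List String :=
  if forbidden_list = [] then (true, [])
  else
    let check_content := if case_sensitive then content else PySem.Str.lower content
    let found := forbidden_list.foldl (fun found word =>
      let check_word := if case_sensitive then word else PySem.Str.lower word
      if PySem.Str.isIn check_word check_content then found ++ [word] else found) []
    (found.length == 0, found)

-- ===== PORT B =====
def check_forbidden_words_alt (content : String) (forbidden_list : List String) (case_sensitive : Bool) : Bool × List String :=
  if forbidden_list = [] then (true, [])
  else
    let text := if case_sensitive then content.toList else PySem.Chars.lower content.toList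
    let keys := forbidden_list.map (fun w => if case_sensitive then w.toList else PySem.Chars.lower w.toList)
    let lengths := PySem.Set.ofList (keys.map (fun k => (k.length : Int)))
    -- for L in lengths: for i in range(len(text) - L + 1): substrs.add(text[i:i+L])
    -- (text[i:i+L] with 0 ≤ i ≤ i+L is (text.drop i).take L)
    let substrs := lengths.foldl (fun s L =>
      (PySem.List.pyRange 0 ((text.length : Int) - L + 1) 1).foldl
        (fun s i => PySem.Set.add s ((text.drop i.toNat).take L.toNat)) s) PySem.Set.empty
    -- found = [w for w, k in zip(forbidden_list, keys) if k in substrs]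
    let found := (((forbidden_list.zip keys).filter
      (fun wk => PySem.Set.contains substrs wk.2)).map Prod.fst)
    (found == [], found)

-- ===== PRECONDITION & SPEC =====
def Spec_check_forbidden_words (content : String) (forbidden_list : List String) (case_sensitive : Bool) (out : Bool × List String) : Prop := out = check_forbidden_words_alt content forbidden_list case_sensitive
instance (content : String) (forbidden_list : List String) (case_sensitive : Bool) (out : Bool × List String) : Decidable (Spec_check_forbidden_words content forbidden_list case_sensitive out) := by unfold Spec_check_forbidden_words; infer_instance

-- ===== CLAIM (what is proved, stated in full; the proofs are below) =====
def Claim_equal_check_forbidden_words : Prop := ∀ (content : String) (forbidden_list : List String) (case_sensitive : Bool), Dom_check_forbidden_words content forbidden_list case_sensitive → Spec_check_forbidden_words content forbidden_list case_sensitive (check_forbidden_words content forbidden_list case_sensitive)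

-- ===== LEMMAS AND PROOFS =====

-- infix = some suffix has it as a prefix, with the start index bounded by the length
theorem pv_infix_iff_exists_drop (l₁ l₂ : List Char) : l₁ <:+: l₂ ↔ ∃ i ≤ l₂.length, l₁ <+: l₂.drop i := by
  constructor
  · rintro ⟨s, t, rfl⟩
    exact ⟨s.length, by simp, by simp⟩
  · rintro ⟨i, _, h⟩
    exact h.isInfix.trans (List.drop_suffix i l₂).isInfix

-- membership in the inner add-fold (one length)
theorem pv_mem_inner (is : List Int) (g : Int → List Char) (s : PySem.Set (List Char)) (x : List Char) :
    x ∈ is.foldl (fun s i => PySem.Set.add s (g i)) s ↔ x ∈ s ∨ ∃ i ∈ is, x = g i := by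
  induction is generalizing s with
  | nil => simp
  | cons i is ih =>
    simp only [List.foldl_cons, ih, PySem.Set.mem_add]
    aesop

-- membership in the two nested add-folds
theorem pv_mem_substrs (Ls : List Int) (R : Int → List Int) (g : Int → Int → List Char)
    (s : PySem.Set (List Char)) (x : List Char) :
    x ∈ Ls.foldl (fun s L => (R L).foldl (fun s i => PySem.Set.add s (g L i)) s) s ↔
      x ∈ s ∨ ∃ L ∈ Ls, ∃ i ∈ R L, x = g L i := by
  induction Ls generalizing s with
  | nil => simp
  | cons L Ls ih =>
    simp only [List.foldl_cons, ih, pv_mem_inner]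
    aesop

-- filtering the zip of a list with its image under f, then projecting, is filtering through f
theorem pv_filter_zip_map {α β : Type} (l : List α) (f : α → β) (q : β → Bool) :
    (((l.zip (l.map f)).filter (fun wk => q wk.2)).map Prod.fst) = l.filter (fun w => q (f w)) := by
  induction l with
  | nil => rfl
  | cons a l ih =>
    by_cases h : q (f a) = true <;> simp [List.filter, h, ih]

-- a key is a substring of text iff B's substring set of the occurring lengths contains it
theorem pv_isIn_eq_substrs (text : List Char) (keys : List (List Char)) (k : List Char) (hk : k ∈ keys) :
    PySem.Chars.isIn k text =
      PySem.Set.contains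
        ((PySem.Set.ofList (keys.map (fun k => (k.length : Int)))).foldl (fun s L =>
          (PySem.List.pyRange 0 ((text.length : Int) - L + 1) 1).foldl
            (fun s i => PySem.Set.add s ((text.drop i.toNat).take L.toNat)) s) PySem.Set.empty) k := by
  rw [Bool.eq_iff_iff, PySem.Chars.isIn_iff_infix, PySem.Set.contains_iff,
    pv_mem_substrs (PySem.Set.ofList (keys.map (fun k => (k.length : Int))))
      (fun L => PySem.List.pyRange 0 ((text.length : Int) - L + 1) 1)
      (fun L i => (text.drop i.toNat).take L.toNat),
    pv_infix_iff_exists_drop]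
  constructor
  · rintro ⟨i, hi, hpre⟩
    refine Or.inr ⟨(k.length : Int), ?_, (i : Int), ?_, ?_⟩
    · exact (PySem.Set.mem_ofList _ _).mpr (List.mem_map.mpr ⟨k, hk, rfl⟩)
    · have hle : k.length ≤ text.length - i := by
        have := hpre.length_le
        simp only [List.length_drop] at this
        omega
      rw [PySem.List.mem_pyRange_one]
      omega
    · simp only [Int.toNat_natCast]
      exact List.prefix_iff_eq_take.mp hpre
  · rintro (hemp | ⟨L, hL, i, hi, rfl⟩)
    · simp [PySem.Set.empty] at hemp
    · have hL0 : 0 ≤ L := by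
        rcases List.mem_map.mp ((PySem.Set.mem_ofList _ _).mp hL) with ⟨k', _, rfl⟩
        positivity
      rw [PySem.List.mem_pyRange_one] at hi
      refine ⟨i.toNat, by omega, List.take_prefix _ _⟩

-- ===== VERDICT (by name: the statement is the Claim_ definition above) =====
theorem check_forbidden_words_spec : Claim_equal_check_forbidden_words := by
  intro content forbidden_list case_sensitive _
  show _ = _
  unfold check_forbidden_words check_forbidden_words_alt
  by_cases hfl : forbidden_list = []
  · simp [hfl]
  · simp only [hfl, if_false]
    set text : List Char := if case_sensitive then content.toList else PySem.Chars.lower content.toList with htext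
    set keys := forbidden_list.map (fun w => if case_sensitive then w.toList else PySem.Chars.lower w.toList) with hkeys
    set substrs := (PySem.Set.ofList (keys.map (fun k => (k.length : Int)))).foldl (fun s L =>
        (PySem.List.pyRange 0 ((text.length : Int) - L + 1) 1).foldl
          (fun s i => PySem.Set.add s ((text.drop i.toNat).take L.toNat)) s) PySem.Set.empty with hsubstrs
    -- per-word agreement of the two membership tests
    have hword : ∀ w ∈ forbidden_list,
        PySem.Str.isIn (if case_sensitive then w else PySem.Str.lower w)
            (if case_sensitive then content else PySem.Str.lower content) =
          PySem.Set.contains substrs (if case_sensitive then w.toList else PySem.Chars.lower w.toList) := by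
      intro w hw
      have hkw : (if case_sensitive then w else PySem.Str.lower w).toList =
          (if case_sensitive then w.toList else PySem.Chars.lower w.toList) := by
        by_cases h : case_sensitive <;> simp [h, PySem.Str.lower]
      have hcc : (if case_sensitive then content else PySem.Str.lower content).toList = text := by
        by_cases h : case_sensitive <;> simp [htext, h, PySem.Str.lower]
      rw [PySem.Str.isIn_eq, hkw, hcc, hsubstrs]
      exact pv_isIn_eq_substrs text keys _ (hkeys ▸ List.mem_map.mpr ⟨w, hw, rfl⟩)
    -- both found-lists are the same filter of forbidden_list
    have hfound :
        forbidden_list.foldl (fun found word =>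
            if PySem.Str.isIn (if case_sensitive then word else PySem.Str.lower word)
                (if case_sensitive then content else PySem.Str.lower content)
              then found ++ [word] else found) [] =
          (((forbidden_list.zip keys).filter
            (fun wk => PySem.Set.contains substrs wk.2)).map Prod.fst) := by
      rw [PySem.List.foldl_append_if_eq_filter, hkeys,
        pv_filter_zip_map forbidden_list
          (fun w => if case_sensitive then w.toList else PySem.Chars.lower w.toList)
          (fun k => PySem.Set.contains substrs k)]
      simp only [List.nil_append]
      exact List.filter_congr (fun w hw => hword w hw)
    simp only [hfound]
    cases h : (((forbidden_list.zip keys).filter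
        (fun wk => PySem.Set.contains substrs wk.2)).map Prod.fst) <;> simp
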